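-- pv_equiv track=rewrite | github.com/vincenzorm117/CCI_6edition | problems/chapter16/20_t9/python/solution.py | wordToT9Str
-- ===== SOURCE A (Python) =====
-- def wordToT9Str(word):
--     t9 = ''
--     for char in word:
--         if char == 'a' or char == 'b' or char == 'c':
--             t9 += '2'
--         elif char == 'd' or char == 'e' or char == 'f':
--             t9 += '3'
--         elif char == 'g' or char == 'h' or char == 'i':
--             t9 += '4'
--         elif char == 'j' or char == 'k' or char == 'l':
--             t9 += '5'
--         elif char == 'm' or char == 'n' or char == 'o':
--             t9 += '6'
--         elif char == 'p' or char == 'q' or char == 'r' or char == 's':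
--             t9 += '7'
--         elif char == 't' or char == 'u' or char == 'v':
--             t9 += '8'
--         elif char == 'w' or char == 'x' or char == 'y' or char == 'z':
--             t9 += '9'
--         else:
--             return None
--     return t9
-- ===== SOURCE B (Python) =====
-- _T9 = str.maketrans('abcdefghijklmnopqrstuvwxyz', '2223334445556667777888' + '9999')
--
-- def wordToT9Str(word):
--     if all('a' <= c <= 'z' for c in word):
--         return word.translate(_T9)
--     return None
-- ===== Notes on version B (the rewrite author's own statement) =====
-- stated objective: idiomatic
-- what changed: Replaced the interleaved guard-and-append branch chain with a separate all-lowercase validation pass followed by one bulk str.translate using a table built once with str.maketrans.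
import Mathlib
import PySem

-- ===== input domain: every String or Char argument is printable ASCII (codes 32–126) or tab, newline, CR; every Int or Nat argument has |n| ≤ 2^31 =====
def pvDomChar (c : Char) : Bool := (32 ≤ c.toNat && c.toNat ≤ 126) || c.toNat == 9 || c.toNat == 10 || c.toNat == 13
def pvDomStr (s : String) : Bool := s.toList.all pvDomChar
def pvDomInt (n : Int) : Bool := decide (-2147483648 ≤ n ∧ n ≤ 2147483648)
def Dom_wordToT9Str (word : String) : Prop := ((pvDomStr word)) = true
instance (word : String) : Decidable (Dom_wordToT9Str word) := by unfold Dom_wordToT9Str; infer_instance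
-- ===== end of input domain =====

-- B replaces A's interleaved guard-and-append branch chain by a separate all-lowercase
-- validation pass followed by one bulk translation through a table built once (idiomatic).

-- ===== PORT A =====
-- A's for-loop with early 'return None': structural recursion over the characters,
-- carrying the accumulated digit string t9 (as List Char, rendered via String.ofList at the end).
def wordToT9A_go (t9 : List Char) : List Char → Option (List Char)
  | [] => some t9
  | c :: rest =>
    if c = 'a' ∨ c = 'b' ∨ c = 'c' then wordToT9A_go (t9 ++ ['2']) rest
    else if c = 'd' ∨ c = 'e' ∨ c = 'f' then wordToT9A_go (t9 ++ ['3']) rest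
    else if c = 'g' ∨ c = 'h' ∨ c = 'i' then wordToT9A_go (t9 ++ ['4']) rest
    else if c = 'j' ∨ c = 'k' ∨ c = 'l' then wordToT9A_go (t9 ++ ['5']) rest
    else if c = 'm' ∨ c = 'n' ∨ c = 'o' then wordToT9A_go (t9 ++ ['6']) rest
    else if c = 'p' ∨ c = 'q' ∨ c = 'r' ∨ c = 's' then wordToT9A_go (t9 ++ ['7']) rest
    else if c = 't' ∨ c = 'u' ∨ c = 'v' then wordToT9A_go (t9 ++ ['8']) rest
    else if c = 'w' ∨ c = 'x' ∨ c = 'y' ∨ c = 'z' then wordToT9A_go (t9 ++ ['9']) rest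
    else none

def wordToT9Str (word : String) : Option String :=
  (wordToT9A_go [] word.toList).map String.ofList

-- ===== PORT B =====
-- the str.maketrans table: letter c ↦ table[ord(c) - ord('a')]
def t9Table : List Char := "22233344455566677778889999".toList

-- validation pass ('a' <= c <= 'z' for all c), then one bulk translate (a map through the table)
def wordToT9Str_alt (word : String) : Option String :=
  if word.toList.all (fun c => 'a' ≤ c && c ≤ 'z') then
    some (String.ofList (word.toList.map (fun c => t9Table.getD (c.toNat - 97) c)))
  else none

-- ===== PRECONDITION & SPEC =====
def Spec_wordToT9Str (word : String) (out : Option String) : Prop := out = wordToT9Str_alt word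
instance (word : String) (out : Option String) : Decidable (Spec_wordToT9Str word out) := by unfold Spec_wordToT9Str; infer_instance

-- ===== CLAIM (what is proved, stated in full; the proofs are below) =====
def Claim_equal_wordToT9Str : Prop := ∀ (word : String), Dom_wordToT9Str word → Spec_wordToT9Str word (wordToT9Str word)

-- ===== LEMMAS AND PROOFS =====

-- A single character is handled by A's branch chain iff it is a lowercase letter,
-- and then the digit it appends is exactly B's table lookup.
theorem t9_go_characterisation (l : List Char) : ∀ (t9 : List Char),
    wordToT9A_go t9 l =
      if l.all (fun c => 'a' ≤ c && c ≤ 'z') then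
        some (t9 ++ l.map (fun c => t9Table.getD (c.toNat - 97) c))
      else none := by
  induction l with
  | nil => intro t9; simp [wordToT9A_go]
  | cons c rest ih =>
    intro t9
    by_cases h : ('a' ≤ c && c ≤ 'z') = true
    · -- lowercase: enumerate the 26 concrete letters
      have h97 : 97 ≤ c.toNat := by
        simp only [Bool.and_eq_true, decide_eq_true_eq, Char.le_def] at h
        exact_mod_cast h.1
      have h122 : c.toNat ≤ 122 := by
        simp only [Bool.and_eq_true, decide_eq_true_eq, Char.le_def] at h
        exact_mod_cast h.2
      have hofn : Char.ofNat c.toNat = c := Char.ofNat_toNat c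
      interval_cases hn : c.toNat <;>
        (subst hofn; simp [wordToT9A_go, ih, t9Table])
    · -- not lowercase: every branch condition forces a lowercase letter, so A hits 'return None'
      rw [wordToT9A_go]
      rw [if_neg, if_neg, if_neg, if_neg, if_neg, if_neg, if_neg, if_neg]
      · simp [List.all_cons, h]
      all_goals rintro (rfl | rfl | rfl | rfl) <;> (revert h; decide)

-- ===== VERDICT (by name: the statement is the Claim_ definition above) =====
theorem wordToT9Str_spec : Claim_equal_wordToT9Str := by
  intro word _
  unfold Spec_wordToT9Str wordToT9Str wordToT9Str_alt
  rw [t9_go_characterisation]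
  split <;> simp
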